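-- pv_equiv track=rewrite | github.com/krohak/Project_Euler | HackerRank/GS/Coderpad/periodic.py | is_periodic
-- ===== SOURCE A (Python) =====
-- def is_periodic(string):
--
--     for window_size in range(1, len(string)):
--         current_window = string[:window_size]
--         is_priodic_window = True
--         for iteration in range(window_size, len(string), window_size):
--             if not current_window == string[iteration:iteration+window_size]:
--                 is_priodic_window = False
--                 break
--
--         if is_priodic_window:
--             return current_window, len(string) // window_size
--
--     return string, 1
-- ===== SOURCE B (Python) =====
-- def is_periodic(string):
--     n = len(string)
--     for w in range(1, n // 2 + 1):
--         if n % w == 0: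
--             k = n // w
--             if string[:w] * k == string:
--                 return string[:w], k
--     return string, 1
-- ===== Notes on version B (the rewrite author's own statement) =====
-- stated objective: faster
-- what changed: Instead of comparing every w-chunk against the prefix for each candidate window, B only tries divisors w of n up to n//2 and checks string[:w]*k == string with one repeated-prefix comparison.
import Mathlib
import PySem

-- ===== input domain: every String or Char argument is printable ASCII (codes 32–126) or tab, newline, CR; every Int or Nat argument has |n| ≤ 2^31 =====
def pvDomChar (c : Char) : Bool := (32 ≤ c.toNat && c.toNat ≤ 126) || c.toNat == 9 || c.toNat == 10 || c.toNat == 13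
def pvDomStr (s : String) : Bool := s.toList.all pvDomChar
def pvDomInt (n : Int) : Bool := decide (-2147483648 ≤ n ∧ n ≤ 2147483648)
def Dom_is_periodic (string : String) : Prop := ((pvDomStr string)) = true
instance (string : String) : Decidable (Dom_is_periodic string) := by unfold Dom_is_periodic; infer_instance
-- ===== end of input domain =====

-- B tries only divisor windows w ≤ n//2 and compares string[:w]*k with the whole string,
-- instead of A's chunk-by-chunk scan for every window size (objective: faster).


-- ===== PORT A =====
-- outer loop over window_size with early return; the inner for-loop with break/flag is the .all
def isPeriodicGoA (s : List Char) : List Int → String × Int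
  | [] => (String.ofList s, 1)
  | w :: ws =>
    let cw := PySem.List.slice s none (some w)
    if (PySem.List.pyRange w (s.length : Int) w).all
         (fun i => PySem.List.slice s (some i) (some (i + w)) == cw)
    then (String.ofList cw, PySem.Int.floordiv (s.length : Int) w)
    else isPeriodicGoA s ws

def is_periodic (string : String) : String × Int :=
  isPeriodicGoA string.toList (PySem.List.pyRange 1 (string.toList.length : Int) 1)

-- ===== PORT B =====
-- loop over w in range(1, n//2 + 1); on divisor windows compare string[:w]*k with string
def isPeriodicGoB (s : List Char) : List Int → String × Int
  | [] => (String.ofList s, 1)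
  | w :: ws =>
    if PySem.Int.mod (s.length : Int) w == 0 then
      let k := PySem.Int.floordiv (s.length : Int) w
      if (List.replicate k.toNat (PySem.List.slice s none (some w))).flatten == s
      then (String.ofList (PySem.List.slice s none (some w)), k)
      else isPeriodicGoB s ws
    else isPeriodicGoB s ws

def is_periodic_alt (string : String) : String × Int :=
  isPeriodicGoB string.toList
    (PySem.List.pyRange 1 (PySem.Int.floordiv (string.toList.length : Int) 2 + 1) 1)

-- ===== PRECONDITION & SPEC =====
def Spec_is_periodic (string : String) (out : String × Int) : Prop := out = is_periodic_alt string
instance (string : String) (out : String × Int) : Decidable (Spec_is_periodic string out) := by unfold Spec_is_periodic; infer_instance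

-- ===== CLAIM (what is proved, stated in full; the proofs are below) =====
def Claim_equal_is_periodic : Prop := ∀ (string : String), Dom_is_periodic string → Spec_is_periodic string (is_periodic string)

-- ===== LEMMAS AND PROOFS =====

-- the window test A performs at window size w
def condA (s : List Char) (w : Int) : Bool :=
  (PySem.List.pyRange w (s.length : Int) w).all
    (fun i => PySem.List.slice s (some i) (some (i + w)) == PySem.List.slice s none (some w))

-- the window test B performs at window size w
def condB (s : List Char) (w : Int) : Bool :=
  (PySem.Int.mod (s.length : Int) w == 0) &&
  ((List.replicate (PySem.Int.floordiv (s.length : Int) w).toNat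
      (PySem.List.slice s none (some w))).flatten == s)

theorem goA_cons (s : List Char) (w : Int) (ws : List Int) :
    isPeriodicGoA s (w :: ws) =
      if condA s w
      then (String.ofList (PySem.List.slice s none (some w)), PySem.Int.floordiv (s.length : Int) w)
      else isPeriodicGoA s ws := by
  simp [isPeriodicGoA, condA]

theorem goB_cons (s : List Char) (w : Int) (ws : List Int) :
    isPeriodicGoB s (w :: ws) =
      if condB s w
      then (String.ofList (PySem.List.slice s none (some w)), PySem.Int.floordiv (s.length : Int) w)
      else isPeriodicGoB s ws := by
  by_cases h1 : PySem.Int.mod (s.length : Int) w == 0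
  · by_cases h2 : (List.replicate (PySem.Int.floordiv (s.length : Int) w).toNat
        (PySem.List.slice s none (some w))).flatten == s
    · simp [isPeriodicGoB, condB, h1, h2]
    · simp [isPeriodicGoB, condB, h1, h2]
  · simp [isPeriodicGoB, condB, h1]

-- the common characterization: every cw-aligned chunk of s equals cw  ↔  s is (|s|/|cw|) copies of cw
theorem chunks_iff (cw : List Char) (hw : 0 < cw.length) :
    ∀ (n : Nat) (s : List Char), s.length = n →
      ((∀ i : Nat, i < s.length → cw.length ∣ i → (s.drop i).take cw.length = cw) ↔
        (cw.length ∣ s.length ∧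
          (List.replicate (s.length / cw.length) cw).flatten = s)) := by
  intro n
  induction n using Nat.strong_induction_on with
  | _ n ih =>
    intro s hsn
    by_cases h0 : s.length = 0
    · rw [List.length_eq_zero_iff] at h0
      subst h0
      simp
    · rcases Nat.lt_or_ge s.length cw.length with hlen | hlen
      · constructor
        · intro h
          exfalso
          have h00 := h 0 (by omega) (dvd_zero _)
          rw [List.drop_zero, List.take_of_length_le (le_of_lt hlen)] at h00
          have := congrArg List.length h00
          omega
        · rintro ⟨hdvd, -⟩
          exfalso
          have := Nat.le_of_dvd (by omega) hdvd
          omega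
      · have hdl : (List.drop cw.length s).length = s.length - cw.length := by simp
        have key := ih (s.length - cw.length) (by omega) (s.drop cw.length) hdl
        have step : (∀ i : Nat, i < s.length → cw.length ∣ i → (s.drop i).take cw.length = cw) ↔
            (s.take cw.length = cw ∧
             ∀ i : Nat, i < (s.drop cw.length).length → cw.length ∣ i →
               ((s.drop cw.length).drop i).take cw.length = cw) := by
          constructor
          · intro h
            refine ⟨by simpa using h 0 (by omega) (dvd_zero _), fun i hi hd => ?_⟩
            rw [List.drop_drop]
            exact h (cw.length + i) (by omega) (Nat.dvd_add dvd_rfl hd)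
          · rintro ⟨hh0, h⟩ i hi hd
            rcases Nat.lt_or_ge i cw.length with hlt | hge
            · have : i = 0 := Nat.eq_zero_of_dvd_of_lt hd hlt
              subst this
              simpa using hh0
            · obtain ⟨j, hj⟩ : ∃ j, i = cw.length + j := ⟨i - cw.length, by omega⟩
              subst hj
              have hdj : cw.length ∣ j := (Nat.dvd_add_right dvd_rfl).mp hd
              have := h j (by omega) hdj
              rwa [List.drop_drop] at this
        have rhs : (cw.length ∣ s.length ∧
              (List.replicate (s.length / cw.length) cw).flatten = s) ↔
            (s.take cw.length = cw ∧
             (cw.length ∣ (s.drop cw.length).length ∧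
              (List.replicate ((s.drop cw.length).length / cw.length) cw).flatten
                = s.drop cw.length)) := by
          rw [hdl]
          have hq : s.length / cw.length = (s.length - cw.length) / cw.length + 1 :=
            Nat.div_eq_sub_div hw hlen
          constructor
          · rintro ⟨hd, he⟩
            rw [hq, List.replicate_succ, List.flatten_cons] at he
            set r := (List.replicate ((s.length - cw.length) / cw.length) cw).flatten with hr
            refine ⟨?_, Nat.dvd_sub hd dvd_rfl, ?_⟩
            · rw [← he]; exact List.take_left' rfl
            · rw [← he]; exact (List.drop_left' rfl).symm
          · rintro ⟨h0', hd, he⟩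
            have hdvd : cw.length ∣ s.length := by
              have := Nat.dvd_add hd (dvd_refl cw.length)
              rwa [Nat.sub_add_cancel hlen] at this
            refine ⟨hdvd, ?_⟩
            rw [hq, List.replicate_succ, List.flatten_cons, he]
            conv_rhs => rw [← List.take_append_drop cw.length s]
            rw [h0']
        rw [step, key, rhs]

theorem condA_iff (s : List Char) (w : Int) (hw : 1 ≤ w) :
    condA s w = true ↔
      (∀ i : Nat, i < s.length → w.toNat ∣ i →
        (s.drop i).take w.toNat = s.take w.toNat) := by
  have hw0 : (0:Int) < w := by omega
  have hwc : ((w.toNat : Nat) : Int) = w := Int.toNat_of_nonneg (by omega)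
  unfold condA
  rw [List.all_eq_true]
  constructor
  · intro h I hI hdvd
    rcases Nat.eq_zero_or_pos I with h0 | h0
    · simp [h0]
    · have hIW : w.toNat ≤ I := Nat.le_of_dvd h0 hdvd
      have hdvdI : w ∣ (I : Int) := by
        rw [← hwc]; exact_mod_cast hdvd
      have hmem : ((I : Nat) : Int) ∈ PySem.List.pyRange w (s.length : Int) w := by
        rw [PySem.List.mem_pyRange_iff_of_pos hw0]
        refine ⟨by rw [← hwc]; exact_mod_cast hIW, by exact_mod_cast hI,
          dvd_sub hdvdI dvd_rfl⟩
      have hh := h _ hmem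
      rw [beq_iff_eq] at hh
      rw [← hwc, PySem.List.slice_natCast_add,
        PySem.List.slice_to s (Int.natCast_nonneg w.toNat), Int.toNat_natCast] at hh
      exact hh
  · intro h i hmem
    rw [PySem.List.mem_pyRange_iff_of_pos hw0] at hmem
    obtain ⟨h1, h2, h3⟩ := hmem
    have hi0 : 0 ≤ i := by omega
    have hic : ((i.toNat : Nat) : Int) = i := Int.toNat_of_nonneg hi0
    have hdvdi : w ∣ i := by
      have := dvd_add h3 (dvd_refl w)
      simpa using this
    have hdvd : w.toNat ∣ i.toNat := by
      rw [← hwc, ← hic] at hdvdi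
      exact_mod_cast hdvdi
    rw [beq_iff_eq, ← hic, ← hwc, PySem.List.slice_natCast_add,
      PySem.List.slice_to s (Int.natCast_nonneg w.toNat), Int.toNat_natCast]
    exact h i.toNat (by omega) hdvd

theorem condB_iff (s : List Char) (w : Int) (hw : 1 ≤ w) :
    condB s w = true ↔
      (w.toNat ∣ s.length ∧
        (List.replicate (s.length / w.toNat) (s.take w.toNat)).flatten = s) := by
  have hw0 : (0:Int) < w := by omega
  have hwc : ((w.toNat : Nat) : Int) = w := Int.toNat_of_nonneg (by omega)
  have hf : (PySem.Int.floordiv (s.length : Int) w).toNat = s.length / w.toNat := by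
    set f := PySem.Int.floordiv (s.length : Int) w with hfd
    have hb1 : f * w ≤ (s.length : Int) := (PySem.Int.le_floordiv_iff_mul_le hw0).mp le_rfl
    have hb2 : (s.length : Int) < (f + 1) * w := (PySem.Int.floordiv_lt_iff_lt_mul hw0).mp (by omega)
    have hf0 : 0 ≤ f :=
      (PySem.Int.le_floordiv_iff_mul_le hw0).mpr (by simpa using Int.natCast_nonneg s.length)
    have e1 : f.toNat * w.toNat ≤ s.length := by
      have : ((f.toNat * w.toNat : Nat) : Int) ≤ (s.length : Int) := by
        push_cast [Int.toNat_of_nonneg hf0, hwc]; exact hb1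
      exact_mod_cast this
    have e2 : s.length < (f.toNat + 1) * w.toNat := by
      have : ((s.length : Nat) : Int) < (((f.toNat + 1) * w.toNat : Nat) : Int) := by
        push_cast [Int.toNat_of_nonneg hf0, hwc]; exact hb2
      exact_mod_cast this
    have hle : f.toNat ≤ s.length / w.toNat := (Nat.le_div_iff_mul_le (by omega)).mpr e1
    have hlt2 : s.length / w.toNat < f.toNat + 1 := (Nat.div_lt_iff_lt_mul (by omega)).mpr e2
    omega
  unfold condB
  rw [Bool.and_eq_true, beq_iff_eq, beq_iff_eq, PySem.Int.mod_eq_zero_iff_dvd,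
    PySem.List.slice_to s (show (0:Int) ≤ w by omega), hf]
  constructor
  · rintro ⟨h1, h2⟩
    refine ⟨?_, h2⟩
    rw [← hwc] at h1; exact_mod_cast h1
  · rintro ⟨h1, h2⟩
    exact ⟨by rw [← hwc]; exact_mod_cast h1, h2⟩

theorem cond_eq (s : List Char) (w : Int) (hw : 1 ≤ w) (hlt : w < (s.length : Int)) :
    condA s w = condB s w := by
  have hWlen : w.toNat ≤ s.length := by omega
  have hcl : (s.take w.toNat).length = w.toNat := by
    simp [hWlen]
  rw [Bool.eq_iff_iff, condA_iff s w hw, condB_iff s w hw]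
  have G := chunks_iff (s.take w.toNat) (by omega) s.length s rfl
  rw [hcl] at G
  exact G

-- beyond n//2 no proper window can succeed for B
theorem condB_false (s : List Char) (w : Int)
    (hw2 : PySem.Int.floordiv (s.length : Int) 2 + 1 ≤ w) (hlt : w < (s.length : Int)) :
    condB s w = false := by
  have hf0 : 0 ≤ PySem.Int.floordiv (s.length : Int) 2 :=
    (PySem.Int.le_floordiv_iff_mul_le (by omega)).mpr (by simpa using Int.natCast_nonneg s.length)
  have hw : 1 ≤ w := by omega
  rcases Bool.eq_false_or_eq_true (condB s w) with h | h
  case inr => exact h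
  case inl =>
    exfalso
    rw [condB_iff s w hw] at h
    obtain ⟨hd, -⟩ := h
    obtain ⟨k, hk⟩ := hd
    have hWlt : w.toNat < s.length := by omega
    have hk2 : 2 ≤ k := by
      by_contra hk1
      have : s.length ≤ w.toNat * 1 := by
        rw [hk]
        exact Nat.mul_le_mul_left _ (by omega)
      omega
    have h2w : w * 2 ≤ (s.length : Int) := by
      have : w.toNat * 2 ≤ s.length := by
        calc w.toNat * 2 ≤ w.toNat * k := Nat.mul_le_mul_left _ hk2
        _ = s.length := hk.symm
      have hwc : ((w.toNat : Nat) : Int) = w := Int.toNat_of_nonneg (by omega)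
      rw [← hwc]
      exact_mod_cast this
    have := (PySem.Int.le_floordiv_iff_mul_le (show (0:Int) < 2 by omega)).mpr h2w
    omega

theorem go_eq (s : List Char) :
    ∀ l : List Int, (∀ w ∈ l, 1 ≤ w ∧ w < (s.length : Int)) →
      isPeriodicGoA s l = isPeriodicGoB s l := by
  intro l
  induction l with
  | nil => intro _; rfl
  | cons w ws ih =>
    intro h
    have hw := h w (by simp)
    rw [goA_cons, goB_cons, cond_eq s w hw.1 hw.2, ih (fun x hx => h x (by simp [hx]))]

theorem goA_tail_false (s : List Char) :
    ∀ l : List Int, (∀ w ∈ l, condA s w = false) → isPeriodicGoA s l = (String.ofList s, 1) := by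
  intro l
  induction l with
  | nil => intro _; rfl
  | cons w ws ih =>
    intro h
    rw [goA_cons, h w (by simp), if_neg (by simp)]
    · exact ih fun x hx => h x (by simp [hx])

theorem goA_append (s : List Char) (l1 l2 : List Int)
    (h : ∀ w ∈ l2, condA s w = false) :
    isPeriodicGoA s (l1 ++ l2) = isPeriodicGoA s l1 := by
  induction l1 with
  | nil => simpa [isPeriodicGoA] using goA_tail_false s l2 h
  | cons w ws ih =>
    rw [List.cons_append, goA_cons, goA_cons, ih]

-- ===== VERDICT (by name: the statement is the Claim_ definition above) =====
theorem is_periodic_spec : Claim_equal_is_periodic := by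
  intro string _
  unfold Spec_is_periodic is_periodic is_periodic_alt
  have hf1 : PySem.Int.floordiv (string.toList.length : Int) 2 * 2 ≤ (string.toList.length : Int) :=
    (PySem.Int.le_floordiv_iff_mul_le (by omega)).mp le_rfl
  have hf0 : 0 ≤ PySem.Int.floordiv (string.toList.length : Int) 2 :=
    (PySem.Int.le_floordiv_iff_mul_le (by omega)).mpr (by simpa using Int.natCast_nonneg string.toList.length)
  rcases (show (string.toList.length : Int) ≤ 1 ∨ 1 < (string.toList.length : Int) by omega) with h1 | h1
  · rw [PySem.List.pyRange_one_eq_nil (by omega),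
      PySem.List.pyRange_one_eq_nil (by omega)]
    rfl
  · rw [PySem.List.pyRange_one_append 1 (PySem.Int.floordiv (string.toList.length : Int) 2 + 1)
        (string.toList.length : Int) (by omega) (by omega),
      goA_append string.toList _ _ ?_, go_eq string.toList _ ?_]
    · intro w hw
      rw [PySem.List.mem_pyRange_one] at hw
      exact ⟨by omega, by omega⟩
    · intro w hw
      rw [PySem.List.mem_pyRange_one] at hw
      rw [cond_eq string.toList w (by omega) (by omega)]
      exact condB_false string.toList w (by omega) (by omega)
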